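-- pv_equiv track=rewrite | github.com/greentext01/ccl | scratchsr/scratchsr/util/de_camel_case.py | de_camel_case
-- ===== SOURCE A (Python) =====
-- def de_camel_case(string: str):
--     out = ""
--
--     out += string[0].upper()
--     for char in string[1:]:
--         if char.isupper():
--             out += " "
--             out += char.lower()
--         else:
--             out += char
--
--     return out
-- ===== SOURCE B (Python) =====
-- def de_camel_case(string: str):
--     first = string[0]  # empty input still raises IndexError, like the original
--     words = []
--     cur = [first]
--     for ch in string[1:]:
--         if ch.isupper():
--             words.append(cur)
--             cur = [ch]
--         else:
--             cur.append(ch)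
--     words.append(cur)
--     parts = [words[0][0].upper() + ''.join(words[0][1:])]
--     for w in words[1:]:
--         parts.append(w[0].lower() + ''.join(w[1:]))
--     return ' '.join(parts)
-- ===== Notes on version B (the rewrite author's own statement) =====
-- stated objective: alternative
-- what changed: Instead of emitting output characters one by one while scanning, B partitions the string into words starting at each uppercase character, adjusts only each word's leading character (upper for the first word, lower for the rest), and space-joins the word list.
import Mathlib
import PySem

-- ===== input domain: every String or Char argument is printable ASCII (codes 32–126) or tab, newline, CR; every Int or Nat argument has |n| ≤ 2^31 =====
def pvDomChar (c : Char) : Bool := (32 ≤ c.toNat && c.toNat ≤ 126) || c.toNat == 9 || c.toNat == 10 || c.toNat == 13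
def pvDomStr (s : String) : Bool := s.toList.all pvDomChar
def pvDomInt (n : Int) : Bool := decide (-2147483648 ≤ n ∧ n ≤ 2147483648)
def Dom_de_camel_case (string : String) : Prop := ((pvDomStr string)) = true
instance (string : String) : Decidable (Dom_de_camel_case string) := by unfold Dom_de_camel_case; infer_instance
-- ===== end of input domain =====

-- B partitions the string into words starting at each uppercase character and space-joins
-- them after adjusting only each word's leading character (alternative decomposition, same cost).


-- ===== PORT A =====
def de_camel_case (string : String) : String :=
  let cs := string.toList
  match PySem.List.pyGet? cs 0 with
  | none => ""    -- string[0] raises IndexError on ""; excluded by Pre_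
  | some c0 =>
    String.mk ((PySem.List.slice cs (some 1) none).foldl
      (fun out ch =>
        if PySem.Chars.isupper ch then (out ++ [' ']) ++ [PySem.Chars.lowerChar ch]
        else out ++ [ch])
      ([] ++ [PySem.Chars.upperChar c0]))

-- ===== PORT B =====
-- the word-partition loop of Source B: a new word starts at each uppercase character
def bWords (cur : List Char) : List Char → List (List Char)
  | [] => [cur]
  | c :: r => if PySem.Chars.isupper c then cur :: bWords [c] r else bWords (cur ++ [c]) r

def upperHeadW : List Char → List Char
  | [] => []
  | c :: t => PySem.Chars.upperChar c :: t

def lowerHeadW : List Char → List Char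
  | [] => []
  | c :: t => PySem.Chars.lowerChar c :: t

-- ' '.join
def joinSpace : List (List Char) → List Char
  | [] => []
  | [p] => p
  | p :: q :: ps => p ++ ' ' :: joinSpace (q :: ps)

def de_camel_case_alt (string : String) : String :=
  match string.toList with
  | [] => ""    -- string[0] raises IndexError on ""; excluded by Pre_
  | c0 :: rest =>
    match bWords [c0] rest with
    | [] => ""  -- unreachable: bWords always returns a nonempty list
    | w0 :: ws => String.mk (joinSpace (upperHeadW w0 :: ws.map lowerHeadW))

-- ===== PRECONDITION & SPEC =====
-- Pre_ excludes only the empty string, on which both A and B raise IndexError.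
def Pre_de_camel_case (string : String) : Prop := string.toList ≠ []
instance (string : String) : Decidable (Pre_de_camel_case string) := by unfold Pre_de_camel_case; infer_instance
def pvWitness_de_camel_case : String := "someCamelCase"
def Spec_de_camel_case (string : String) (out : String) : Prop := out = de_camel_case_alt string
instance (string : String) (out : String) : Decidable (Spec_de_camel_case string out) := by unfold Spec_de_camel_case; infer_instance

-- ===== CLAIM (what is proved, stated in full; the proofs are below) =====
def Claim_equal_de_camel_case : Prop := ∀ (string : String), Dom_de_camel_case string → Pre_de_camel_case string → Spec_de_camel_case string (de_camel_case string)

-- ===== LEMMAS AND PROOFS =====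

-- the character stream A's loop appends after the first character
def aBody : List Char → List Char
  | [] => []
  | c :: r => if PySem.Chars.isupper c then ' ' :: PySem.Chars.lowerChar c :: aBody r
              else c :: aBody r

theorem foldA (l acc : List Char) :
    l.foldl (fun out ch =>
        if PySem.Chars.isupper ch then (out ++ [' ']) ++ [PySem.Chars.lowerChar ch]
        else out ++ [ch]) acc = acc ++ aBody l := by
  induction l generalizing acc with
  | nil => simp [aBody]
  | cons c r ih =>
    rw [List.foldl_cons, ih]
    by_cases h : PySem.Chars.isupper c = true <;> simp [aBody, h]

theorem joinSpace_eq (p : List Char) (qs : List (List Char)) :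
    joinSpace (p :: qs) = p ++ qs.flatMap (fun q => ' ' :: q) := by
  induction qs generalizing p with
  | nil => simp [joinSpace]
  | cons q qs ih => simp [joinSpace, ih]

theorem bWords_main (r : List Char) (c : Char) (t : List Char) :
    ∃ w0 ws, bWords (c :: t) r = (c :: w0) :: ws ∧
      w0 ++ ws.flatMap (fun w => ' ' :: lowerHeadW w) = t ++ aBody r := by
  induction r generalizing c t with
  | nil => exact ⟨t, [], rfl, by simp [aBody]⟩
  | cons d r ih =>
    by_cases h : PySem.Chars.isupper d = true
    · obtain ⟨w0', ws', h1, h2⟩ := ih d []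
      refine ⟨t, (d :: w0') :: ws', by simp [bWords, h, h1], ?_⟩
      simp only [List.nil_append] at h2
      rw [List.flatMap_cons]
      have hl : lowerHeadW (d :: w0') = PySem.Chars.lowerChar d :: w0' := rfl
      rw [hl]
      simp only [aBody, h, if_true]
      rw [← h2]
      simp
    · obtain ⟨w0, ws, h1, h2⟩ := ih c (t ++ [d])
      refine ⟨w0, ws, ?_, ?_⟩
      · simpa [bWords, h] using h1
      · simp [aBody, h]
        simpa using h2

-- ===== VERDICT (by name: the statement is the Claim_ definition above) =====
theorem de_camel_case_spec : Claim_equal_de_camel_case := by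
  intro s _ hpre
  unfold Spec_de_camel_case de_camel_case de_camel_case_alt
  cases hcs : s.toList with
  | nil => exact absurd hcs hpre
  | cons c0 rest =>
    obtain ⟨w0, ws, h1, h2⟩ := bWords_main rest c0 []
    simp only [List.nil_append] at h2
    simp only [PySem.List.pyGet?_zero_cons, PySem.List.slice_from_one,
      List.tail_cons, List.nil_append, h1]
    rw [foldA, joinSpace_eq]
    have hu : upperHeadW (c0 :: w0) = PySem.Chars.upperChar c0 :: w0 := rfl
    rw [hu, ← h2]
    simp [List.flatMap_def, Function.comp_def]
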